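-- pv_equiv track=rewrite | github.com/Naiina/topic_classification | UD_dict.py | turn_the_last_zero_to_one
-- ===== SOURCE A (Python) =====
-- def turn_the_last_zero_to_one(l):
--     i = len(l)-1
--     for elem in reversed(l):
--         if elem ==0:
--             l[i] = 1
--             return l
--         i = i-1
--     return l
-- ===== SOURCE B (Python) =====
-- def turn_the_last_zero_to_one(l):
--     idx = -1
--     for j, e in enumerate(l):
--         if e == 0:
--             idx = j
--     if idx >= 0:
--         l[idx] = 1
--     return l
-- ===== Notes on version B (the rewrite author's own statement) =====
-- stated objective: alternative
-- what changed: Replaces A's reverse scan with early exit by a single forward pass over enumerate that remembers the index of the last zero, then assigns once after the loop.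
import Mathlib
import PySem

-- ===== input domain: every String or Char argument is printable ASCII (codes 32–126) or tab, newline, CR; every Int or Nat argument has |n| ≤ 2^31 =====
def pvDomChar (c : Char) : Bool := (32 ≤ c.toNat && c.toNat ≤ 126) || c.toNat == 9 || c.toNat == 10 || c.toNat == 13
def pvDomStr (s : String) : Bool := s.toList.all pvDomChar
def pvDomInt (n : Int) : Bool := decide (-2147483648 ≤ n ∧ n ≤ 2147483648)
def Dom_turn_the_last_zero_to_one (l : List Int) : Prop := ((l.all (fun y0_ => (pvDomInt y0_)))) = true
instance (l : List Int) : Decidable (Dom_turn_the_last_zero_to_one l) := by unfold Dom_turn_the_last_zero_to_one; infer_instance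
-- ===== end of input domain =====

-- B replaces A's reverse scan with early exit by one forward pass remembering the last zero's
-- index (objective: alternative decomposition). Both Pythons mutate l in place identically
-- (one index assignment at the last zero); the equivalence proved here is about the return value.

-- ===== PORT A =====
-- A's loop: walk reversed(l) with index i counting down; at the first zero, assign and return.
-- l[i] = 1 is ported as pySetD: i is in range at every assignment A performs (exact there).
def aGo (rev : List Int) (i : Int) (l : List Int) : List Int :=
  match rev with
  | [] => l
  | e :: rest => if e = 0 then PySem.List.pySetD l i 1 else aGo rest (i - 1) l

def turn_the_last_zero_to_one (l : List Int) : List Int :=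
  aGo l.reverse ((l.length : Int) - 1) l

-- ===== PORT B =====
def turn_the_last_zero_to_one_alt (l : List Int) : List Int :=
  let idx := (PySem.List.enumerate l 0).foldl (fun acc p => if p.2 = 0 then p.1 else acc) (-1)
  if 0 ≤ idx then PySem.List.pySetD l idx 1 else l

-- ===== PRECONDITION & SPEC =====
def Spec_turn_the_last_zero_to_one (l : List Int) (out : List Int) : Prop := out = turn_the_last_zero_to_one_alt l
instance (l : List Int) (out : List Int) : Decidable (Spec_turn_the_last_zero_to_one l out) := by unfold Spec_turn_the_last_zero_to_one; infer_instance

-- ===== CLAIM =====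
def Claim_equal_turn_the_last_zero_to_one : Prop := ∀ (l : List Int), Dom_turn_the_last_zero_to_one l → Spec_turn_the_last_zero_to_one l (turn_the_last_zero_to_one l)

-- ===== LEMMAS AND PROOFS =====

-- index of the LAST zero in l (front recursion)
def lastZero? : List Int → Option Nat
  | [] => none
  | x :: xs =>
    match lastZero? xs with
    | some k => some (k + 1)
    | none => if x = 0 then some 0 else none

theorem aGo_eq (r : List Int) : ∀ (i : Int) (l : List Int),
    aGo r i l = match r.findIdx? (fun x => x == 0) with
      | some k => PySem.List.pySetD l (i - (k : Int)) 1
      | none => l := by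
  induction r with
  | nil => intro i l; simp [aGo]
  | cons x rest ih =>
    intro i l
    by_cases hx : x = 0
    · simp [aGo, hx, List.findIdx?_cons]
    · simp only [aGo, if_neg hx, List.findIdx?_cons, show (x == 0) = false by simp [hx],
        ih]
      cases hf : rest.findIdx? (fun x => x == 0) with
      | none => simp
      | some k =>
        simp only []
        congr 1
        push_cast
        ring

theorem lastZero?_concat (ys : List Int) (x : Int) :
    lastZero? (ys ++ [x]) = if x = 0 then some ys.length else lastZero? ys := by
  induction ys with
  | nil => simp [lastZero?]
  | cons y ys ih =>
    simp only [List.cons_append, lastZero?, ih, List.length_cons]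
    by_cases hx : x = 0
    · cases lastZero? ys <;> simp [hx]
    · simp [hx]

theorem revfind (l : List Int) :
    (match lastZero? l with
      | some k => k < l.length ∧ l.reverse.findIdx? (fun x => x == 0) = some (l.length - 1 - k)
      | none => l.reverse.findIdx? (fun x => x == 0) = none) := by
  induction l using List.reverseRecOn with
  | nil => simp [lastZero?]
  | append_singleton ys x ih =>
    rw [lastZero?_concat]
    by_cases hx : x = 0
    · simp [hx, List.findIdx?_cons]
    · simp only [if_neg hx, List.reverse_append, List.reverse_singleton, List.singleton_append,
        List.findIdx?_cons, show (x == 0) = false by simp [hx]]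
      cases hz : lastZero? ys with
      | none => rw [hz] at ih; simp [ih]
      | some k =>
        rw [hz] at ih
        obtain ⟨hk, hfind⟩ := ih
        refine ⟨by simp; omega, ?_⟩
        rw [hfind]
        simp only [Option.map_some]
        simp
        omega

theorem scan_eq (xs : List Int) : ∀ (s acc : Int),
    (PySem.List.enumerate xs s).foldl (fun acc p => if p.2 = 0 then p.1 else acc) acc
      = match lastZero? xs with
        | some k => s + (k : Int)
        | none => acc := by
  induction xs with
  | nil => intro s acc; simp [PySem.List.enumerate_nil, lastZero?]
  | cons x xs ih =>
    intro s acc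
    rw [PySem.List.enumerate_cons, List.foldl_cons, ih]
    simp only [lastZero?]
    cases lastZero? xs with
    | some k => push_cast; ring_nf
    | none =>
      by_cases hx : x = 0 <;> simp [hx]

-- ===== VERDICT =====
theorem turn_the_last_zero_to_one_spec : Claim_equal_turn_the_last_zero_to_one := by
  intro l _
  unfold Spec_turn_the_last_zero_to_one turn_the_last_zero_to_one turn_the_last_zero_to_one_alt
  rw [aGo_eq, scan_eq]
  have h := revfind l
  cases hz : lastZero? l with
  | none =>
    rw [hz] at h
    simp [h]
  | some k =>
    rw [hz] at h
    obtain ⟨hk, hfind⟩ := h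
    rw [hfind]
    simp only []
    rw [if_pos (by positivity)]
    have hk' : ((l.length - 1 - k : Nat) : Int) = (l.length : Int) - 1 - k := by omega
    rw [hk']
    congr 1
    ring
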